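-- pv_equiv track=rewrite | github.com/pragadeesh891/trolley | multilingual_backend.py | process_command_with_patterns
-- ===== SOURCE A (Python) =====
-- COMMAND_PATTERNS = {
--     "movement": {
--         "forward": ["move forward", "go forward", "forward", "ahead"],
--         "backward": ["move backward", "go backward", "backward", "back", "reverse"],
--         "left": ["turn left", "left"],
--         "right": ["turn right", "right"],
--         "stop": ["stop", "halt", "pause"]
--     },
--     "speed": {
--         "increase": ["faster", "speed up", "increase speed", "go faster"],
--         "decrease": ["slower", "slow down", "decrease speed", "go slower"]
--     },
--     "cart": ["show cart", "cart", "my items", "what's in my cart"],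
--     "checkout": ["checkout", "pay", "bill", "check out"],
--     "help": ["help", "assist", "support", "what can you do"]
-- }
--
-- def process_command_with_patterns(text):
--     """Process command using pattern matching"""
--     # Check for movement commands
--     for direction, patterns in COMMAND_PATTERNS["movement"].items():
--         for pattern in patterns:
--             if pattern in text:
--                 return {"action": "movement", "direction": direction, "message": f"Moving {direction}"}
--
--     # Check for speed commands
--     for change, patterns in COMMAND_PATTERNS["speed"].items():
--         for pattern in patterns:
--             if pattern in text:
--                 return {"action": "speed", "change": change, "message": f"{'Increasing' if change == 'increase' else 'Decreasing'} speed"}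
--
--     # Check for other commands
--     for pattern in COMMAND_PATTERNS["cart"]:
--         if pattern in text:
--             return {"action": "cart", "message": "Showing your cart contents"}
--
--     for pattern in COMMAND_PATTERNS["checkout"]:
--         if pattern in text:
--             return {"action": "checkout", "message": "Proceeding to checkout"}
--
--     for pattern in COMMAND_PATTERNS["help"]:
--         if pattern in text:
--             return {"action": "help", "message": "Available commands: move forward, turn left, turn right, stop, faster, slower, show cart, checkout, help"}
--
--     # Default response
--     return {"action": "unknown", "message": "Sorry, I didn't understand that command. Say 'help' for available commands."}
-- ===== SOURCE B (Python) =====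
-- COMMAND_PATTERNS = {
--     "movement": {
--         "forward": ["move forward", "go forward", "forward", "ahead"],
--         "backward": ["move backward", "go backward", "backward", "back", "reverse"],
--         "left": ["turn left", "left"],
--         "right": ["turn right", "right"],
--         "stop": ["stop", "halt", "pause"]
--     },
--     "speed": {
--         "increase": ["faster", "speed up", "increase speed", "go faster"],
--         "decrease": ["slower", "slow down", "decrease speed", "go slower"]
--     },
--     "cart": ["show cart", "cart", "my items", "what's in my cart"],
--     "checkout": ["checkout", "pay", "bill", "check out"],
--     "help": ["help", "assist", "support", "what can you do"]
-- }
--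
-- # Precomputed flat dispatch table: (pattern, result dict) in exact priority order.
-- _TABLE = []
-- for _direction, _pats in COMMAND_PATTERNS["movement"].items():
--     _res = {"action": "movement", "direction": _direction, "message": f"Moving {_direction}"}
--     for _p in _pats:
--         _TABLE.append((_p, _res))
-- for _change, _pats in COMMAND_PATTERNS["speed"].items():
--     _res = {"action": "speed", "change": _change,
--             "message": f"{'Increasing' if _change == 'increase' else 'Decreasing'} speed"}
--     for _p in _pats:
--         _TABLE.append((_p, _res))
-- for _p in COMMAND_PATTERNS["cart"]:
--     _TABLE.append((_p, {"action": "cart", "message": "Showing your cart contents"}))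
-- for _p in COMMAND_PATTERNS["checkout"]:
--     _TABLE.append((_p, {"action": "checkout", "message": "Proceeding to checkout"}))
-- for _p in COMMAND_PATTERNS["help"]:
--     _TABLE.append((_p, {"action": "help", "message": "Available commands: move forward, turn left, turn right, stop, faster, slower, show cart, checkout, help"}))
--
-- _UNKNOWN = {"action": "unknown", "message": "Sorry, I didn't understand that command. Say 'help' for available commands."}
--
-- def process_command_with_patterns(text):
--     """Process command using a single flat pattern table"""
--     for pattern, result in _TABLE:
--         if pattern in text:
--             return dict(result)
--     return dict(_UNKNOWN)
-- ===== Notes on version B (the rewrite author's own statement) =====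
-- stated objective: idiomatic
-- what changed: Replaced A's four-level nested scans over the nested COMMAND_PATTERNS structure with a single precomputed flat (pattern, result) dispatch table in exact priority order, scanned by one first-match loop.
import Mathlib
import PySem

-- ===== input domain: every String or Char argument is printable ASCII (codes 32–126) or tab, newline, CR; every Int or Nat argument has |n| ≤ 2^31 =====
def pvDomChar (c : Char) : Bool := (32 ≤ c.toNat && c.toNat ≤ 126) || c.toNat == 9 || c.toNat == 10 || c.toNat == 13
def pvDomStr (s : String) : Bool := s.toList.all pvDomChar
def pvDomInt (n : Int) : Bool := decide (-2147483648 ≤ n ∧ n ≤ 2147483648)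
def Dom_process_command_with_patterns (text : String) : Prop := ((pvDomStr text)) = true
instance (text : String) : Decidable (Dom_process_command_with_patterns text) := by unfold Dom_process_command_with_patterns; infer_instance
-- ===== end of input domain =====

-- B replaces A's four nested priority scans with one precomputed flat (pattern, result) table
-- and a single first-match pass (objective: idiomatic/simpler decomposition).

-- ===== PORT A =====
-- COMMAND_PATTERNS["movement"] as an insertion-ordered dict: List (key × patterns)
def pvMovement : List (String × List String) :=
  [("forward", ["move forward", "go forward", "forward", "ahead"]),
   ("backward", ["move backward", "go backward", "backward", "back", "reverse"]),
   ("left", ["turn left", "left"]),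
   ("right", ["turn right", "right"]),
   ("stop", ["stop", "halt", "pause"])]

def pvSpeed : List (String × List String) :=
  [("increase", ["faster", "speed up", "increase speed", "go faster"]),
   ("decrease", ["slower", "slow down", "decrease speed", "go slower"])]

def pvCart : List String := ["show cart", "cart", "my items", "what's in my cart"]
def pvCheckout : List String := ["checkout", "pay", "bill", "check out"]
def pvHelp : List String := ["help", "assist", "support", "what can you do"]

-- 'for direction, patterns in ….items(): for pattern in patterns: if pattern in text: return …'
-- : the first key whose pattern list has a pattern occurring in text
def pvScanDict (text : String) : List (String × List String) → Option String
  | [] => none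
  | (key, pats) :: rest =>
      if pats.any (fun p => PySem.Str.isIn p text) then some key else pvScanDict text rest

-- 'for pattern in pats: if pattern in text: return …'
def pvScanList (text : String) (pats : List String) : Bool :=
  pats.any (fun p => PySem.Str.isIn p text)

def process_command_with_patterns (text : String) : List (String × String) :=
  match pvScanDict text pvMovement with
  | some direction =>
      [("action", "movement"), ("direction", direction), ("message", "Moving " ++ direction)]
  | none =>
  match pvScanDict text pvSpeed with
  | some change =>
      [("action", "speed"), ("change", change),
       ("message", (if change == "increase" then "Increasing" else "Decreasing") ++ " speed")]
  | none =>
  if pvScanList text pvCart then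
    [("action", "cart"), ("message", "Showing your cart contents")]
  else if pvScanList text pvCheckout then
    [("action", "checkout"), ("message", "Proceeding to checkout")]
  else if pvScanList text pvHelp then
    [("action", "help"), ("message", "Available commands: move forward, turn left, turn right, stop, faster, slower, show cart, checkout, help")]
  else
    [("action", "unknown"), ("message", "Sorry, I didn't understand that command. Say 'help' for available commands.")]

-- ===== PORT B =====
-- the _TABLE build loops of Source B: flatten each group into (pattern, result) entries
def pvTable : List (String × List (String × String)) :=
  (pvMovement.flatMap (fun kp =>
      kp.2.map (fun p =>
        (p, [("action", "movement"), ("direction", kp.1), ("message", "Moving " ++ kp.1)]))))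
  ++ (pvSpeed.flatMap (fun kp =>
      kp.2.map (fun p =>
        (p, [("action", "speed"), ("change", kp.1),
             ("message", (if kp.1 == "increase" then "Increasing" else "Decreasing") ++ " speed")]))))
  ++ (pvCart.map (fun p => (p, [("action", "cart"), ("message", "Showing your cart contents")])))
  ++ (pvCheckout.map (fun p => (p, [("action", "checkout"), ("message", "Proceeding to checkout")])))
  ++ (pvHelp.map (fun p => (p, [("action", "help"), ("message", "Available commands: move forward, turn left, turn right, stop, faster, slower, show cart, checkout, help")])))

def pvUnknown : List (String × String) :=
  [("action", "unknown"), ("message", "Sorry, I didn't understand that command. Say 'help' for available commands.")]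

-- 'for pattern, result in _TABLE: if pattern in text: return dict(result)'
def pvFirstMatch (text : String) : List (String × List (String × String)) → List (String × String)
  | [] => pvUnknown
  | (p, res) :: rest => if PySem.Str.isIn p text then res else pvFirstMatch text rest

def process_command_with_patterns_alt (text : String) : List (String × String) :=
  pvFirstMatch text pvTable

-- ===== PRECONDITION & SPEC =====
def Spec_process_command_with_patterns (text : String) (out : List (String × String)) : Prop := out = process_command_with_patterns_alt text
instance (text : String) (out : List (String × String)) : Decidable (Spec_process_command_with_patterns text out) := by unfold Spec_process_command_with_patterns; infer_instance

-- ===== CLAIM (what is proved, stated in full; the proofs are below) =====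
def Claim_equal_process_command_with_patterns : Prop := ∀ (text : String), Dom_process_command_with_patterns text → Spec_process_command_with_patterns text (process_command_with_patterns text)

-- ===== LEMMAS AND PROOFS =====

-- Option-valued first match, to reason about pvFirstMatch compositionally
def pvFM (text : String) : List (String × List (String × String)) → Option (List (String × String))
  | [] => none
  | (p, res) :: rest => if PySem.Str.isIn p text then some res else pvFM text rest

theorem pvFirstMatch_eq_pvFM (text : String) (l : List (String × List (String × String))) :
    pvFirstMatch text l = (pvFM text l).getD pvUnknown := by
  induction l with
  | nil => rfl
  | cons hd tl ih =>
      obtain ⟨p, res⟩ := hd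
      simp only [pvFirstMatch, pvFM]
      split_ifs <;> simp [ih]

theorem pvFM_append (text : String) (xs ys : List (String × List (String × String))) :
    pvFM text (xs ++ ys) = (pvFM text xs).or (pvFM text ys) := by
  induction xs with
  | nil => rfl
  | cons hd tl ih =>
      obtain ⟨p, res⟩ := hd
      simp only [List.cons_append, pvFM]
      split_ifs <;> simp [ih]

theorem pvFM_map_const (text : String) (pats : List String) (res : List (String × String)) :
    pvFM text (pats.map (fun p => (p, res)))
      = if pats.any (fun p => PySem.Str.isIn p text) then some res else none := by
  induction pats with
  | nil => rfl
  | cons hd tl ih =>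
      simp only [List.map, pvFM, List.any_cons, Bool.or_eq_true]
      split_ifs with h1 h2 h2 <;> simp_all

theorem pvFM_flatMap (text : String) (items : List (String × List String))
    (f : String → List (String × String)) :
    pvFM text (items.flatMap (fun kp => kp.2.map (fun p => (p, f kp.1))))
      = (pvScanDict text items).map f := by
  induction items with
  | nil => rfl
  | cons hd tl ih =>
      obtain ⟨key, pats⟩ := hd
      simp only [List.flatMap_cons, pvScanDict, pvFM_append, pvFM_map_const]
      split_ifs <;> simp [ih]

-- ===== VERDICT (by name: the statement is the Claim_ definition above) =====
theorem process_command_with_patterns_spec : Claim_equal_process_command_with_patterns := by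
  intro text _
  unfold Spec_process_command_with_patterns process_command_with_patterns
    process_command_with_patterns_alt pvTable pvScanList
  rw [pvFirstMatch_eq_pvFM]
  rw [pvFM_append, pvFM_append, pvFM_append, pvFM_append]
  rw [pvFM_flatMap text pvMovement
        (fun d => [("action", "movement"), ("direction", d), ("message", "Moving " ++ d)]),
      pvFM_flatMap text pvSpeed
        (fun c => [("action", "speed"), ("change", c),
          ("message", (if c == "increase" then "Increasing" else "Decreasing") ++ " speed")]),
      pvFM_map_const, pvFM_map_const, pvFM_map_const]
  cases pvScanDict text pvMovement <;>
    cases pvScanDict text pvSpeed <;>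
      split_ifs <;> simp_all [Option.or, pvUnknown]
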